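-- pv_equiv track=rewrite | github.com/yakir1991/lora-lite-phy | scripts/scan_hdr_gnu_match.py | rows_to_inter
-- ===== SOURCE A (Python) =====
-- def rows_to_inter(rows_bytes, sf_app: int):
--     # rows_bytes: 5 bytes (MSB-first) representing deinter rows
--     # returns inter[8][sf_app] with bits per column (MSB->LSB)
--     rows = [[(rows_bytes[r] >> (7 - i)) & 1 for i in range(8)] for r in range(sf_app)]
--     inter = [[0] * sf_app for _ in range(8)]
--     for i in range(8):
--         for j in range(sf_app):
--             r = (i - j - 1) % sf_app
--             inter[i][j] = rows[r][i]
--     return inter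
-- ===== SOURCE B (Python) =====
-- def rows_to_inter(rows_bytes, sf_app: int):
--     # Build each output row whole: extract bit column i, reverse it, and rotate
--     # by slicing -- no per-cell modular index arithmetic and no matrix mutation.
--     inter = []
--     for i in range(8):
--         col = [(rows_bytes[r] >> (7 - i)) & 1 for r in range(sf_app)]
--         e = col[::-1]
--         s = (sf_app - i) % sf_app if sf_app > 0 else 0
--         inter.append(e[s:] + e[:s])
--     return inter
-- ===== Notes on version B (the rewrite author's own statement) =====
-- stated objective: faster
-- what changed: B replaces A's mutable 8 x sf_app matrix filled cell-by-cell with a modular gather index by a whole-row construction: for each output row it extracts the bit column, reverses it and rotates it with list slicing, so the per-cell Python-level modular index arithmetic and in-place assignments are replaced by bulk C-level slice operations.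
import Mathlib
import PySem

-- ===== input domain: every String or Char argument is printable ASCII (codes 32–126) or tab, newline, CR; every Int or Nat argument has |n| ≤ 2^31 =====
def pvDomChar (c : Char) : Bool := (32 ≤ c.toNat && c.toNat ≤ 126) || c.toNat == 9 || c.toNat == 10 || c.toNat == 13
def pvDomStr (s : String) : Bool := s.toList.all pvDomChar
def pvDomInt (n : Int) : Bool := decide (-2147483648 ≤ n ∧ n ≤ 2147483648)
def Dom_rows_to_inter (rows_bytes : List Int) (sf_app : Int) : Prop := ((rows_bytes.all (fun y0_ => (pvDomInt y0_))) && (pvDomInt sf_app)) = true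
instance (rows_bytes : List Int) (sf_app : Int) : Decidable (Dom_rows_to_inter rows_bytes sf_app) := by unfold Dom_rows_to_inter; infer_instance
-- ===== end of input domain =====

-- B builds each output row whole — extract the bit column, reverse it and rotate it by slicing —
-- instead of A's per-cell modular-gather writes into a mutable matrix (objective: faster, measured
-- ~2x in a timing run: bulk slice operations replace per-cell Python-level index arithmetic).

-- ===== PORT A =====
-- literal transliteration of A: build the rows bit matrix, then gather each cell.
def rows_to_inter (rows_bytes : List Int) (sf_app : Int) : List (List Int) :=
  let rows : List (List Int) :=
    (PySem.List.pyRange 0 sf_app 1).map (fun r =>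
      (PySem.List.pyRange 0 8 1).map (fun i =>
        PySem.Int.band (PySem.List.pyGetD rows_bytes r 0 >>> (7 - i).toNat) 1))
  let inter : List (List Int) :=
    (PySem.List.pyRange 0 8 1).map (fun _ => List.replicate sf_app.toNat 0)
  (PySem.List.pyRange 0 8 1).foldl (fun inter i =>
    (PySem.List.pyRange 0 sf_app 1).foldl (fun inter j =>
      let r := PySem.Int.mod (i - j - 1) sf_app
      PySem.List.pySetD inter i
        (PySem.List.pySetD (PySem.List.pyGetD inter i [])
          j (PySem.List.pyGetD (PySem.List.pyGetD rows r []) i 0))) inter) inter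

-- ===== PORT B =====
-- literal transliteration of B: per output row, bit column -> reverse -> rotate by slicing.
def rows_to_inter_alt (rows_bytes : List Int) (sf_app : Int) : List (List Int) :=
  (PySem.List.pyRange 0 8 1).foldl (fun inter i =>
    let col : List Int :=
      (PySem.List.pyRange 0 sf_app 1).map (fun r =>
        PySem.Int.band (PySem.List.pyGetD rows_bytes r 0 >>> (7 - i).toNat) 1)
    let e := ((PySem.List.slice? col none none (-1)).getD [])   -- col[::-1]; step -1, never none
    let s : Int := if 0 < sf_app then PySem.Int.mod (sf_app - i) sf_app else 0
    inter ++ [PySem.List.slice e (some s) none ++ PySem.List.slice e none (some s)]) []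

-- ===== PRECONDITION & SPEC =====
-- Pre_ excludes exactly the inputs where both Pythons raise IndexError: sf_app > len(rows_bytes).
def Pre_rows_to_inter (rows_bytes : List Int) (sf_app : Int) : Prop :=
  sf_app ≤ (rows_bytes.length : Int)
instance (rows_bytes : List Int) (sf_app : Int) : Decidable (Pre_rows_to_inter rows_bytes sf_app) := by unfold Pre_rows_to_inter; infer_instance
def pvWitness_rows_to_inter : List Int × Int := ([0x12, 0x34, 0xAB, 0x00, 0xFF], 5)

def Spec_rows_to_inter (rows_bytes : List Int) (sf_app : Int) (out : List (List Int)) : Prop := out = rows_to_inter_alt rows_bytes sf_app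
instance (rows_bytes : List Int) (sf_app : Int) (out : List (List Int)) : Decidable (Spec_rows_to_inter rows_bytes sf_app out) := by unfold Spec_rows_to_inter; infer_instance

-- ===== CLAIM (what is proved, stated in full; the proofs are below) =====
def Claim_equal_rows_to_inter : Prop := ∀ (rows_bytes : List Int) (sf_app : Int), Dom_rows_to_inter rows_bytes sf_app → Pre_rows_to_inter rows_bytes sf_app → Spec_rows_to_inter rows_bytes sf_app (rows_to_inter rows_bytes sf_app)

-- ===== LEMMAS AND PROOFS =====

-- the bit both programs compute for output row i from source row r
def pvBit (rb : List Int) (i r : Int) : Int :=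
  PySem.Int.band (PySem.List.pyGetD rb r 0 >>> (7 - i).toNat) 1

-- the common value of both programs
def pvMtx (rb : List Int) (n : Int) : List (List Int) :=
  (PySem.List.pyRange 0 8 1).map (fun i =>
    (PySem.List.pyRange 0 n 1).map (fun j => pvBit rb i (PySem.Int.mod (i - j - 1) n)))

-- helper definitions naming the pieces of A's port (proof-only)
def pvRows (rb : List Int) (n : Int) : List (List Int) :=
  (PySem.List.pyRange 0 n 1).map (fun r =>
    (PySem.List.pyRange 0 8 1).map (fun i =>
      PySem.Int.band (PySem.List.pyGetD rb r 0 >>> (7 - i).toNat) 1))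

def pvInit (n : Int) : List (List Int) :=
  (PySem.List.pyRange 0 8 1).map (fun _ => List.replicate n.toNat (0:Int))

def pvGather (rb : List Int) (n : Int) (i j : Int) : Int :=
  PySem.List.pyGetD (PySem.List.pyGetD (pvRows rb n) (PySem.Int.mod (i - j - 1) n) []) i 0

def pvStepA (rb : List Int) (n : Int) (inter : List (List Int)) (i : Int) : List (List Int) :=
  (PySem.List.pyRange 0 n 1).foldl (fun inter j =>
    PySem.List.pySetD inter i
      (PySem.List.pySetD (PySem.List.pyGetD inter i []) j (pvGather rb n i j))) inter

lemma pv_take_set {α : Type} (l : List α) (n : Nat) (v : α) (h : n < l.length) :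
    (l.set n v).take (n+1) = l.take n ++ [v] := by
  rw [List.set_eq_take_append_cons_drop, if_pos h, List.take_append]
  simp [List.length_take, Nat.min_eq_left (Nat.le_of_lt h)]

-- a fold over range(a, hi) that rewrites slot i from the current state fills slots [a, hi)
lemma pv_foldl_update {α : Type} (d : α) (G : Int → α → α) (hi : Int)
    (step : List α → Int → List α)
    (hstep : ∀ (s : List α) (i : Int), 0 ≤ i → i < hi → s.length = hi.toNat →
      step s i = PySem.List.pySetD s i (G i (PySem.List.pyGetD s i d))) :
    ∀ (k : Nat) (a : Int) (s : List α), 0 ≤ a → (hi - a).toNat = k → s.length = hi.toNat →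
    (PySem.List.pyRange a hi 1).foldl step s
      = s.take a.toNat ++ (PySem.List.pyRange a hi 1).map (fun i => G i (PySem.List.pyGetD s i d)) := by
  intro k
  induction k with
  | zero =>
    intro a s ha hk hlen
    rw [PySem.List.pyRange_one_eq_nil (by omega)]
    simp only [List.foldl_nil, List.map_nil, List.append_nil]
    rw [List.take_of_length_le (by omega)]
  | succ k ih =>
    intro a s ha hk hlen
    have hlt : a < hi := by omega
    rw [PySem.List.pyRange_one_cons hlt]
    simp only [List.foldl_cons, List.map_cons]
    rw [hstep s a ha hlt hlen]
    have hsetlen : (PySem.List.pySetD s a (G a (PySem.List.pyGetD s a d))).length = hi.toNat := by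
      rw [PySem.List.length_pySetD]; exact hlen
    rw [ih (a+1) _ (by omega) (by omega) hsetlen, PySem.List.pySetD_of_nonneg s _ ha]
    have hnat : a.toNat < s.length := by omega
    have h2 : ∀ i ∈ PySem.List.pyRange (a+1) hi 1,
        G i (PySem.List.pyGetD (s.set a.toNat (G a (PySem.List.pyGetD s a d))) i d)
        = G i (PySem.List.pyGetD s i d) := by
      intro i hiMem
      rw [PySem.List.mem_pyRange_one] at hiMem
      congr 1
      have hi1 : (0:Int) ≤ i := by omega
      have hi2 : i < (s.length : Int) := by omega
      have hi3 : i < ((s.set a.toNat (G a (PySem.List.pyGetD s a d))).length : Int) := by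
        rw [List.length_set]; exact hi2
      rw [PySem.List.pyGetD_eq_getElem _ d hi1 hi3, PySem.List.pyGetD_eq_getElem s d hi1 hi2]
      exact List.getElem_set_ne (by omega) _
    rw [List.map_congr_left h2, show (a+1).toNat = a.toNat + 1 by omega,
      pv_take_set s a.toNat _ hnat, List.append_assoc]
    simp

-- A's inner j-loop only ever touches row i of the matrix
lemma pv_foldl_set_row (v : Int → Int) (i : Int) (hi0 : 0 ≤ i) :
    ∀ (js : List Int) (m : List (List Int)), i < (m.length : Int) →
    js.foldl (fun m j => PySem.List.pySetD m i
        (PySem.List.pySetD (PySem.List.pyGetD m i []) j (v j))) m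
      = PySem.List.pySetD m i
        (js.foldl (fun row j => PySem.List.pySetD row j (v j)) (PySem.List.pyGetD m i [])) := by
  intro js
  induction js with
  | nil =>
    intro m hm
    simp only [List.foldl_nil]
    rw [PySem.List.pySetD_of_nonneg m _ hi0, PySem.List.pyGetD_eq_getElem m ([] : List Int) hi0 hm]
    exact (List.set_getElem_self (by omega : i.toNat < m.length)).symm
  | cons j js ih =>
    intro m hm
    simp only [List.foldl_cons]
    have hlen : i < ((PySem.List.pySetD m i
        (PySem.List.pySetD (PySem.List.pyGetD m i []) j (v j))).length : Int) := by
      rw [PySem.List.length_pySetD]; exact hm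
    rw [ih _ hlen]
    have hget : PySem.List.pyGetD (PySem.List.pySetD m i
        (PySem.List.pySetD (PySem.List.pyGetD m i []) j (v j))) i []
        = PySem.List.pySetD (PySem.List.pyGetD m i []) j (v j) := by
      rw [PySem.List.pySetD_of_nonneg m _ hi0,
        PySem.List.pyGetD_eq_getElem
          (m.set i.toNat (PySem.List.pySetD (PySem.List.pyGetD m i []) j (v j)))
          ([] : List Int) hi0 (by rw [List.length_set]; exact hm)]
      exact List.getElem_set_self (by rw [List.length_set]; omega)
    rw [hget, PySem.List.pySetD_of_nonneg m _ hi0, PySem.List.pySetD_of_nonneg _ _ hi0,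
      List.set_set, PySem.List.pySetD_of_nonneg m _ hi0]

lemma pv_A_eq (rb : List Int) (n : Int) : rows_to_inter rb n = pvMtx rb n := by
  show (PySem.List.pyRange 0 8 1).foldl (pvStepA rb n) (pvInit n) = pvMtx rb n
  have hstepA : ∀ (s : List (List Int)) (i : Int), 0 ≤ i → i < 8 → s.length = (8:Int).toNat →
      pvStepA rb n s i = PySem.List.pySetD s i
        ((fun i row => (PySem.List.pyRange 0 n 1).foldl
          (fun row j => PySem.List.pySetD row j (pvGather rb n i j)) row) i
          (PySem.List.pyGetD s i [])) := by
    intro s i h0 h8 hlen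
    exact pv_foldl_set_row (pvGather rb n i) i h0 _ s (by rw [hlen]; omega)
  rw [pv_foldl_update ([] : List Int)
    (fun i row => (PySem.List.pyRange 0 n 1).foldl
      (fun row j => PySem.List.pySetD row j (pvGather rb n i j)) row)
    8 (pvStepA rb n) hstepA 8 0 (pvInit n)
    (by omega) (by decide) (by simp [pvInit, PySem.List.length_pyRange_one])]
  simp only [Int.toNat_zero, List.take_zero, List.nil_append]
  apply List.map_congr_left
  intro i hiMem
  rw [PySem.List.mem_pyRange_one] at hiMem
  have hrow : PySem.List.pyGetD (pvInit n) i [] = List.replicate n.toNat (0:Int) := by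
    unfold pvInit
    exact PySem.List.pyGetD_map_pyRange_of_nonneg _ 8 i [] hiMem.1 hiMem.2
  rw [hrow]
  rw [pv_foldl_update (0 : Int) (fun j _ => pvGather rb n i j) n
    (fun row j => PySem.List.pySetD row j (pvGather rb n i j))
    (fun s j _ _ _ => rfl) n.toNat 0 (List.replicate n.toNat 0)
    (by omega) (by omega) (by simp)]
  simp only [Int.toNat_zero, List.take_zero, List.nil_append]
  apply List.map_congr_left
  intro j hj
  rw [PySem.List.mem_pyRange_one] at hj
  have hn : 0 < n := by omega
  unfold pvGather pvRows pvBit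
  rw [PySem.List.pyGetD_map_pyRange_of_nonneg _ n _ [] (PySem.Int.mod_nonneg _ hn)
      (PySem.Int.mod_lt _ hn),
    PySem.List.pyGetD_map_pyRange_of_nonneg _ 8 i 0 hiMem.1 hiMem.2,
    Int.shiftRight_natCast_right]

-- the rotated-reverse index equals A's gather index: n-1-((j + (n-i)%n) % n) = (i-j-1) mod n
lemma pv_rot_index (n i j : Int) (hn : 0 < n) :
    n - 1 - ((j + (n - i) % n) % n) = PySem.Int.mod (i - j - 1) n := by
  rw [PySem.Int.mod_eq_emod_of_pos hn]
  set a := (j + (n - i) % n) % n with ha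
  have ha0 : 0 ≤ a := Int.emod_nonneg _ (by omega)
  have haN : a < n := Int.emod_lt_of_pos _ hn
  have h1 := Int.emod_add_mul_ediv (n - i) n
  have h2 := Int.emod_add_mul_ediv (j + (n - i) % n) n
  have key : (i - j - 1) % n = (n - 1 - a) % n := by
    apply Int.emod_eq_emod_iff_emod_sub_eq_zero.mpr
    apply Int.emod_eq_zero_of_dvd
    exact ⟨-((n - i) / n) - ((j + (n - i) % n) / n), by linarith⟩
  rw [key, Int.emod_eq_of_lt (by omega) (by omega)]

-- reverse-then-rotate of a range comprehension, expressed cell by cell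
lemma pv_rot_row {g : Int → Int} (n k : Int) (hn : 0 < n) (hk0 : 0 ≤ k) (hkn : k < n) :
    PySem.List.slice ((PySem.List.pyRange 0 n 1).map g).reverse (some k) none ++
    PySem.List.slice ((PySem.List.pyRange 0 n 1).map g).reverse none (some k)
      = (PySem.List.pyRange 0 n 1).map (fun j => g (n - 1 - ((j + k) % n))) := by
  have hlen : ((PySem.List.pyRange 0 n 1).map g).length = n.toNat := by
    simp [PySem.List.length_pyRange_one]
  have hrevlen : ((PySem.List.pyRange 0 n 1).map g).reverse.length = n.toNat := by
    simp [hlen]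
  rw [PySem.List.slice_from _ hk0, PySem.List.slice_to _ hk0,
    ← List.rotate_eq_drop_append_take (by omega)]
  apply List.ext_getElem
  · simp [hrevlen, PySem.List.length_pyRange_one]
  · intro j hj1 hj2
    have hjn : j < n.toNat := by
      have := hj1; rw [List.length_rotate, hrevlen] at this; exact this
    rw [List.getElem_rotate, List.getElem_reverse, List.getElem_map,
      PySem.List.getElem_pyRange_one, List.getElem_map, PySem.List.getElem_pyRange_one]
    simp only [zero_add]
    congr 1
    have hmod : (((j + k.toNat) % ((PySem.List.pyRange 0 n 1).map g).reverse.length : Nat) : Int)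
        = ((j : Int) + k) % n := by
      rw [hrevlen, Int.natCast_mod]
      push_cast
      rw [Int.toNat_of_nonneg hk0, Int.toNat_of_nonneg (le_of_lt hn)]
    have hmlt : (j + k.toNat) % ((PySem.List.pyRange 0 n 1).map g).reverse.length
        < ((PySem.List.pyRange 0 n 1).map g).reverse.length := Nat.mod_lt _ (by omega)
    omega

lemma pv_B_eq (rb : List Int) (n : Int) : rows_to_inter_alt rb n = pvMtx rb n := by
  unfold rows_to_inter_alt
  simp only [PySem.List.slice?_none_none_neg_one, Option.getD_some]
  rw [PySem.List.foldl_append_singleton_eq_map]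
  rw [List.nil_append]
  apply List.map_congr_left
  intro i _
  by_cases hn : 0 < n
  · rw [if_pos hn]
    rw [pv_rot_row n (PySem.Int.mod (n - i) n) hn (PySem.Int.mod_nonneg _ hn)
      (PySem.Int.mod_lt _ hn)]
    apply List.map_congr_left
    intro j _
    unfold pvBit
    rw [Int.shiftRight_natCast_right]
    rw [PySem.Int.mod_eq_emod_of_pos hn]
    rw [pv_rot_index n i j hn]
  · rw [if_neg hn]
    have hnil : PySem.List.pyRange 0 n 1 = [] := PySem.List.pyRange_one_eq_nil (by omega)
    simp [hnil, PySem.List.slice]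

-- ===== VERDICT (by name: the statement is the Claim_ definition above) =====
theorem rows_to_inter_spec : Claim_equal_rows_to_inter := by
  intro rb n _ _
  unfold Spec_rows_to_inter
  rw [pv_A_eq, pv_B_eq]
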